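-- pv_equiv track=rewrite | github.com/CraftSpider/CraftBin | Python/utils/library_codes.py | is_year
-- ===== SOURCE A (Python) =====
-- def is_year(string):
--     is_year_format = True
--     at_letter = False
--     num_nums = 0
--     for char in string:
--         if not at_letter:
--             if char.isnumeric():
--                 num_nums += 1
--             elif char.isalpha():
--                 if num_nums != 4:
--                     is_year_format = False
--                     break
--                 at_letter = True
--         else:
--             if not char.isalpha():
--                 is_year_format = False
--                 break
--     return is_year_format
-- ===== SOURCE B (Python) =====
-- def is_year(string):
--     idx = next((i for i, c in enumerate(string) if c.isalpha()), None)
--     if idx is None: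
--         return True
--     if sum(1 for c in string[:idx] if c.isnumeric()) != 4:
--         return False
--     return all(c.isalpha() for c in string[idx:])
-- ===== Notes on version B (the rewrite author's own statement) =====
-- stated objective: simpler
-- what changed: Replaced the single-pass boolean/counter state machine with a find-then-count-then-validate decomposition: locate the first alphabetic character, count numerics in the prefix, and check the suffix is all alphabetic.
import Mathlib
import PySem

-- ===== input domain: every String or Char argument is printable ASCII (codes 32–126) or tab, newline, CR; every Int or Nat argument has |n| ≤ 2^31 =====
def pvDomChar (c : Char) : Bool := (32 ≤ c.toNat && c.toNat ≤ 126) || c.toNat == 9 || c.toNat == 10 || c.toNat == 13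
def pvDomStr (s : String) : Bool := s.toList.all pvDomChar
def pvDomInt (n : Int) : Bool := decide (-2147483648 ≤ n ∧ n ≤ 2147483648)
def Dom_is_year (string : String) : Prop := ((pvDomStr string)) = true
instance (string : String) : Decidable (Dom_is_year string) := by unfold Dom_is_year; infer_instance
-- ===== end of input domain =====

-- B replaces A's single-pass state machine by a find-first-alpha / count-prefix-numerics / check-suffix decomposition (objective: simpler).

-- ===== PORT A =====
-- A's loop over the string's characters with state (at_letter, num_nums); returning false models the `break` with is_year_format = False.
def isYearLoopA : List Char → Bool → Int → Bool
  | [], _, _ => true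
  | c :: rest, atLetter, numNums =>
    if !atLetter then
      if PySem.Chars.isdigit c then
        isYearLoopA rest atLetter (numNums + 1)
      else if PySem.Chars.isalpha c then
        if numNums ≠ 4 then false
        else isYearLoopA rest true numNums
      else
        isYearLoopA rest atLetter numNums
    else
      if !(PySem.Chars.isalpha c) then false
      else isYearLoopA rest atLetter numNums

def is_year (string : String) : Bool :=
  isYearLoopA string.toList false 0

-- ===== PORT B =====
def is_year_alt (string : String) : Bool :=
  let cs := string.toList
  match cs.findIdx? (fun c => PySem.Chars.isalpha c) with
  | none => true
  | some idx =>
      if (cs.take idx).countP (fun c => PySem.Chars.isdigit c) ≠ 4 then false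
      else (cs.drop idx).all (fun c => PySem.Chars.isalpha c)

-- ===== PRECONDITION & SPEC =====
def Spec_is_year (string : String) (out : Bool) : Prop := out = is_year_alt string
instance (string : String) (out : Bool) : Decidable (Spec_is_year string out) := by unfold Spec_is_year; infer_instance

-- ===== CLAIM (what is proved, stated in full; the proofs are below) =====
def Claim_equal_is_year : Prop := ∀ (string : String), Dom_is_year string → Spec_is_year string (is_year string)

-- ===== LEMMAS AND PROOFS =====

-- Once A has seen its first letter, the loop just checks that the rest is all alphabetic.
theorem isYearLoopA_true (cs : List Char) (n : Int) :
    isYearLoopA cs true n = cs.all (fun c => PySem.Chars.isalpha c) := by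
  induction cs generalizing n with
  | nil => rfl
  | cons c rest ih =>
    simp only [isYearLoopA, List.all_cons]
    by_cases h : PySem.Chars.isalpha c = true <;> simp [h, ih]

-- Before the first letter, A's loop computes B's decomposition with the digit count offset by n.
theorem isYearLoopA_false (cs : List Char) (n : Int) :
    isYearLoopA cs false n =
      (match cs.findIdx? (fun c => PySem.Chars.isalpha c) with
       | none => true
       | some idx =>
           if n + ((cs.take idx).countP (fun c => PySem.Chars.isdigit c) : Int) ≠ 4 then false
           else (cs.drop idx).all (fun c => PySem.Chars.isalpha c)) := by
  induction cs generalizing n with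
  | nil => rfl
  | cons c rest ih =>
    by_cases ha : PySem.Chars.isalpha c = true
    · have hd : PySem.Chars.isdigit c = false := by
        revert ha
        simp [PySem.Chars.isalpha, PySem.Chars.isupper, PySem.Chars.islower,
              PySem.Chars.isdigit, Char.le_def, UInt32.le_iff_toNat_le]
        omega
      simp [isYearLoopA, hd, ha, List.findIdx?_cons, isYearLoopA_true]
    · have ha' : PySem.Chars.isalpha c = false := by simp [ha]
      by_cases hd : PySem.Chars.isdigit c = true
      · simp only [isYearLoopA, hd, ha, Bool.not_false, if_true, ih]
        simp only [List.findIdx?_cons, ha']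
        cases hfi : rest.findIdx? (fun c => PySem.Chars.isalpha c) with
        | none => rfl
        | some idx =>
          simp [List.take_succ_cons, hd, List.drop_succ_cons]
          have h4 : ∀ k : ℤ, n + 1 + k = n + (k + 1) := by intro k; ring
          rw [h4]
      · simp only [isYearLoopA, hd, ha, Bool.not_false, if_true, if_false, ih]
        simp only [List.findIdx?_cons, ha']
        cases hfi : rest.findIdx? (fun c => PySem.Chars.isalpha c) with
        | none => rfl
        | some idx =>
          simp [List.take_succ_cons, List.countP_cons, hd, List.drop_succ_cons]

-- ===== VERDICT (by name: the statement is the Claim_ definition above) =====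
theorem is_year_spec : Claim_equal_is_year := by
  intro s _
  unfold Spec_is_year is_year is_year_alt
  rw [isYearLoopA_false]
  cases hfi : s.toList.findIdx? (fun c => PySem.Chars.isalpha c) with
  | none => simp [hfi]
  | some idx =>
    simp only [hfi]
    by_cases h : ((s.toList.take idx).countP (fun c => PySem.Chars.isdigit c)) = 4
    · simp [h]
    · have h2 : (0 : Int) + ((s.toList.take idx).countP (fun c => PySem.Chars.isdigit c) : Int) ≠ 4 := by
        omega
      rw [if_pos h2, if_pos h]
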